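-- pv_equiv track=rewrite | github.com/Pad094/AoC-2021 | p14.py | BuildGeneratorDictionary
-- ===== SOURCE A (Python) =====
-- def BuildGeneratorDictionary(insertionRules):
--     generatorDictionary = {}
--     for primeKey in insertionRules.keys():
--         nextGeneratorSet = []
--         for key in insertionRules.keys():
--             test1 = key[0] + insertionRules[key]
--             test2 = insertionRules[key] + key[1]
--             if test1 == primeKey:
--                 nextGeneratorSet.append(key)
--             if test2 == primeKey:
--                 nextGeneratorSet.append(key)
--
--         nextGeneratorSet = set(nextGeneratorSet)
--         generatorDictionary[primeKey] = nextGeneratorSet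
--
--     return generatorDictionary
-- ===== SOURCE B (Python) =====
-- def BuildGeneratorDictionary(insertionRules):
--     # One pass: bucket every key under the two pair-strings it generates,
--     # then read each prime key's bucket off the index.
--     buckets = {}
--     for key, value in insertionRules.items():
--         buckets.setdefault(key[0] + value, []).append(key)
--         buckets.setdefault(value + key[1], []).append(key)
--     return {primeKey: set(buckets.get(primeKey, []))
--             for primeKey in insertionRules.keys()}
-- ===== Notes on version B (the rewrite author's own statement) =====
-- stated objective: faster
-- what changed: Instead of rescanning all rules for each prime key (nested loops), B makes one pass that buckets each key under its two generated pair-strings in a dict, then reads each prime key's bucket off that index.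
import Mathlib
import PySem

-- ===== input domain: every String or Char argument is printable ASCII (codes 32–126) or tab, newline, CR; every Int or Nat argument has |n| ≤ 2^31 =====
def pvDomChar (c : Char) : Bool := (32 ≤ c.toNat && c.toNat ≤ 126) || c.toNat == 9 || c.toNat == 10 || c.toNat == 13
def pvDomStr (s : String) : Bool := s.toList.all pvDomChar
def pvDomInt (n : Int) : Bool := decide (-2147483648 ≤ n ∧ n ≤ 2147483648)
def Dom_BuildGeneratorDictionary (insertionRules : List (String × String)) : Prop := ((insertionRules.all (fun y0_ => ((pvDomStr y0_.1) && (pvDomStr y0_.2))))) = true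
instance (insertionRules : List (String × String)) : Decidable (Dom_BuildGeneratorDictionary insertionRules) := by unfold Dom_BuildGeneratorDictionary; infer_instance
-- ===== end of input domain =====

-- B replaces A's nested rescan of the rules by a single bucketing pass over the
-- rules plus one lookup per prime key (equality of the RETURN value only).

-- s[i] as Python's one-character string (total form; Pre_ excludes the IndexError inputs)
def pyStrGet (s : String) (i : Int) : String :=
  match PySem.Str.pyGet? s i with
  | some c => String.ofList [c]
  | none => ""

-- ===== PORT A =====
def BuildGeneratorDictionary (insertionRules : List (String × String)) : List (String × List String) :=
  let d := PySem.Dict.ofList insertionRules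
  (d.keys.foldl (fun gd primeKey =>
      let ngs := d.keys.foldl (fun acc key =>
          let test1 := pyStrGet key 0 ++ PySem.Dict.getD d key ""
          let test2 := PySem.Dict.getD d key "" ++ pyStrGet key 1
          let acc' := if test1 == primeKey then acc ++ [key] else acc
          if test2 == primeKey then acc' ++ [key] else acc') []
      PySem.Dict.insert gd primeKey (PySem.Set.ofList ngs)) PySem.Dict.empty).items

-- ===== PORT B =====
def BuildGeneratorDictionary_alt (insertionRules : List (String × String)) : List (String × List String) :=
  let d := PySem.Dict.ofList insertionRules
  let buckets := d.items.foldl (fun b kv =>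
      let b1 := PySem.Dict.modify b (pyStrGet kv.1 0 ++ kv.2) [] (· ++ [kv.1])
      PySem.Dict.modify b1 (kv.2 ++ pyStrGet kv.1 1) [] (· ++ [kv.1]))
    PySem.Dict.empty
  d.keys.map (fun primeKey => (primeKey, PySem.Set.ofList (PySem.Dict.getD buckets primeKey [])))

-- ===== PRECONDITION & SPEC =====
-- Pre_ excludes exactly the inputs where Python A raises IndexError: a rule key shorter than 2 characters.
def Pre_BuildGeneratorDictionary (insertionRules : List (String × String)) : Prop :=
  ∀ p ∈ insertionRules, 2 ≤ p.1.toList.length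
instance (insertionRules : List (String × String)) : Decidable (Pre_BuildGeneratorDictionary insertionRules) := by unfold Pre_BuildGeneratorDictionary; infer_instance
def pvWitness_BuildGeneratorDictionary : (List (String × String)) := [("AB", "C"), ("CB", "A")]

def Spec_BuildGeneratorDictionary (insertionRules : List (String × String)) (out : List (String × List String)) : Prop := out = BuildGeneratorDictionary_alt insertionRules
instance (insertionRules : List (String × String)) (out : List (String × List String)) : Decidable (Spec_BuildGeneratorDictionary insertionRules out) := by unfold Spec_BuildGeneratorDictionary; infer_instance

-- ===== CLAIM (what is proved, stated in full; the proofs are below) =====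
def Claim_equal_BuildGeneratorDictionary : Prop := ∀ (insertionRules : List (String × String)), Dom_BuildGeneratorDictionary insertionRules → Pre_BuildGeneratorDictionary insertionRules → Spec_BuildGeneratorDictionary insertionRules (BuildGeneratorDictionary insertionRules)

-- ===== LEMMAS AND PROOFS =====

-- a fold inserting fresh distinct keys appends its table in order
theorem pv_items_foldl_insert (l : List String) (F : String → List String)
    (gd : PySem.Dict String (List String))
    (h : ∀ a ∈ l, gd.contains a = false) (hl : l.Nodup) :
    (l.foldl (fun gd p => PySem.Dict.insert gd p (F p)) gd).items
      = gd.items ++ l.map (fun p => (p, F p)) := by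
  induction l generalizing gd with
  | nil => simp
  | cons x xs ih =>
      have hx : gd.contains x = false := h x (by simp)
      have hnd := List.nodup_cons.mp hl
      rw [List.foldl_cons, ih _ ?_ hnd.2]
      · rw [PySem.Dict.items_insert_of_not_contains _ _ hx]
        simp
      · intro a ha
        rw [PySem.Dict.contains_insert]
        have : a ≠ x := fun e => hnd.1 (e ▸ ha)
        simp [this, h a (List.mem_cons_of_mem _ ha)]

-- A's inner scan for one prime key, as a filter of the flattened (target, key) pairs
theorem pv_inner_eq (l : List String) (t1 t2 : String → String) (p : String) (acc : List String) :
    (l.foldl (fun acc key =>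
        let acc' := if t1 key == p then acc ++ [key] else acc
        if t2 key == p then acc' ++ [key] else acc') acc)
      = acc ++ ((l.flatMap (fun k => [(t1 k, k), (t2 k, k)])).filter
                  (fun q => q.1 == p)).map (·.2) := by
  induction l generalizing acc with
  | nil => simp
  | cons x xs ih =>
      rw [List.foldl_cons, ih]
      simp only [List.flatMap_cons, List.filter_append, List.map_append, List.filter_cons]
      by_cases h1 : t1 x == p <;> by_cases h2 : t2 x == p <;>
        simp [h1, h2, List.append_assoc]

-- ===== VERDICT (by name: the statement is the Claim_ definition above) =====
theorem BuildGeneratorDictionary_spec : Claim_equal_BuildGeneratorDictionary := by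
  intro rules _hdom _hpre
  unfold Spec_BuildGeneratorDictionary BuildGeneratorDictionary BuildGeneratorDictionary_alt
  set d := PySem.Dict.ofList rules with hd
  have hnd : d.keys.Nodup := PySem.Dict.nodup_keys_ofList rules
  set t1 : String → String := fun k => pyStrGet k 0 ++ PySem.Dict.getD d k "" with ht1
  set t2 : String → String := fun k => PySem.Dict.getD d k "" ++ pyStrGet k 1 with ht2
  -- A's result
  rw [pv_items_foldl_insert _ _ _ (by intro a _; exact PySem.Dict.contains_empty a) hnd]
  simp only [PySem.Dict.empty, List.nil_append]
  -- B's buckets via the grouping lemma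
  have hitems : d.items = d.keys.map (fun k => (k, PySem.Dict.getD d k "")) :=
    PySem.Dict.items_eq_map_keys d hnd ""
  apply List.map_congr_left
  intro p _hp
  rw [pv_inner_eq _ t1 t2 p []]
  congr 1
  -- buckets.getD p [] = filtered pairs
  have hB : (d.items.foldl (fun b kv =>
        PySem.Dict.modify (PySem.Dict.modify b (pyStrGet kv.1 0 ++ kv.2) [] (· ++ [kv.1]))
          (kv.2 ++ pyStrGet kv.1 1) [] (· ++ [kv.1]))
      ({ items := [] } : PySem.Dict String (List String)))
      = ((d.items.flatMap (fun kv => [(pyStrGet kv.1 0 ++ kv.2, kv.1), (kv.2 ++ pyStrGet kv.1 1, kv.1)])).foldl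
          (fun b q => PySem.Dict.modify b q.1 [] (· ++ [q.2])) PySem.Dict.empty) := by
    rw [List.foldl_flatMap]
    simp
    rfl
  rw [hB, PySem.Dict.getD_foldl_modify_append]
  rw [PySem.Dict.getD_empty, List.nil_append]
  rw [hitems, List.flatMap_map]
  rfl
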